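-- pv_equiv track=rewrite | github.com/Hmdgt2/tol | scripts/gerador_logicas.py | calcular_variaveis
-- ===== SOURCE A (Python) =====
-- from typing import List, Dict, Any, Callable
--
-- def calcular_variaveis(numeros: List[int]) -> Dict[str, Any]:
--     if not numeros:
--         return {}
--     variaveis = {
--         'soma': sum(numeros),
--         'maior': max(numeros),
--         'menor': min(numeros),
--         'media': sum(numeros) // len(numeros),
--         'primeiro': sorted(numeros)[0],
--         'ultimo': sorted(numeros)[-1],
--         'diferenca_maior_menor': max(numeros) - min(numeros),
--         'soma_pares': sum(n for n in numeros if n % 2 == 0),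
--         'soma_impares': sum(n for n in numeros if n % 2 != 0),
--         'soma_ultimos_digitos': sum(n % 10 for n in numeros),
--         'total_numeros': len(numeros),
--     }
--     return variaveis
-- ===== SOURCE B (Python) =====
-- def calcular_variaveis(numeros):
--     if not numeros:
--         return {}
--     first = numeros[0]
--     total = first
--     maior = first
--     menor = first
--     pares = first if first % 2 == 0 else 0
--     impares = 0 if first % 2 == 0 else first
--     dig = first % 10
--     count = 1
--     for n in numeros[1:]:
--         total += n
--         if maior < n:
--             maior = n
--         if n < menor:
--             menor = n
--         if n % 2 == 0:
--             pares += n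
--         else:
--             impares += n
--         dig += n % 10
--         count += 1
--     return {
--         'soma': total,
--         'maior': maior,
--         'menor': menor,
--         'media': total // count,
--         'primeiro': menor,
--         'ultimo': maior,
--         'diferenca_maior_menor': maior - menor,
--         'soma_pares': pares,
--         'soma_impares': impares,
--         'soma_ultimos_digitos': dig,
--         'total_numeros': count,
--     }
-- ===== Notes on version B (the rewrite author's own statement) =====
-- stated objective: faster
-- what changed: Replaces the eight separate builtin scans (two of them full sorts) with a single loop that maintains sum/min/max/parity-sum/digit-sum/count accumulators, using that the first and last elements of the sorted list are the minimum and maximum.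
import Mathlib
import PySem

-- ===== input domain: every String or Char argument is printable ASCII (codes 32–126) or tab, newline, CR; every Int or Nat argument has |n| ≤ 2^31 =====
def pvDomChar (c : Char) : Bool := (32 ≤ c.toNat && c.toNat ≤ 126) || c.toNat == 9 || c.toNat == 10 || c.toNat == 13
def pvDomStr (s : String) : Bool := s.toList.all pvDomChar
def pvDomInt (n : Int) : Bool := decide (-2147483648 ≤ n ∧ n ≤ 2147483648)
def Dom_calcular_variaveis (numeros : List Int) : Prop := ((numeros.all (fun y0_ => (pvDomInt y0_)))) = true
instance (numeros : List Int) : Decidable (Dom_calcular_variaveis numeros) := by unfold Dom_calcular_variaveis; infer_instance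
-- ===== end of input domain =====

-- B replaces A's eight separate scans (two of them sorts) by one accumulator loop; same return value.

-- ===== PORT A =====
-- literal port: each dict entry is the corresponding builtin scan; keys are distinct,
-- so the dict in insertion order is this association list.  `.getD 0` only makes
-- max?/min?/indexing total; the guarded branch guarantees the list is nonempty.
def calcular_variaveis (numeros : List Int) : List (String × Int) :=
  match numeros with
  | [] => []
  | h :: t =>
    let xs := h :: t
    [("soma", xs.foldl (· + ·) 0),
     ("maior", (PySem.List.max? xs (fun y => y)).getD 0),
     ("menor", (PySem.List.min? xs (fun y => y)).getD 0),
     ("media", PySem.Int.floordiv (xs.foldl (· + ·) 0) (xs.length : Int)),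
     ("primeiro", ((PySem.List.sorted xs (fun y => y) false)[0]?).getD 0),
     ("ultimo", ((PySem.List.sorted xs (fun y => y) false).getLast?).getD 0),
     ("diferenca_maior_menor",
        (PySem.List.max? xs (fun y => y)).getD 0 - (PySem.List.min? xs (fun y => y)).getD 0),
     ("soma_pares", xs.foldl (fun acc n => if PySem.Int.mod n 2 = 0 then acc + n else acc) 0),
     ("soma_impares", xs.foldl (fun acc n => if PySem.Int.mod n 2 ≠ 0 then acc + n else acc) 0),
     ("soma_ultimos_digitos", xs.foldl (fun acc n => acc + PySem.Int.mod n 10) 0),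
     ("total_numeros", (xs.length : Int))]

-- ===== PORT B =====
-- state: (total, maior, menor, pares, impares, dig, count)
def pvLoop (t : List Int) (st : Int × Int × Int × Int × Int × Int × Int) :
    Int × Int × Int × Int × Int × Int × Int :=
  match t with
  | [] => st
  | n :: rest =>
    let (total, maior, menor, pares, impares, dig, count) := st
    pvLoop rest (total + n,
      if maior < n then n else maior,
      if n < menor then n else menor,
      if PySem.Int.mod n 2 = 0 then pares + n else pares,
      if PySem.Int.mod n 2 = 0 then impares else impares + n,
      dig + PySem.Int.mod n 10,
      count + 1)

def calcular_variaveis_alt (numeros : List Int) : List (String × Int) :=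
  match numeros with
  | [] => []
  | h :: t =>
    let st := pvLoop t (h, h, h,
      (if PySem.Int.mod h 2 = 0 then h else 0),
      (if PySem.Int.mod h 2 = 0 then 0 else h),
      PySem.Int.mod h 10, 1)
    let (total, maior, menor, pares, impares, dig, count) := st
    [("soma", total),
     ("maior", maior),
     ("menor", menor),
     ("media", PySem.Int.floordiv total count),
     ("primeiro", menor),
     ("ultimo", maior),
     ("diferenca_maior_menor", maior - menor),
     ("soma_pares", pares),
     ("soma_impares", impares),
     ("soma_ultimos_digitos", dig),
     ("total_numeros", count)]

-- ===== PRECONDITION & SPEC =====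
def Spec_calcular_variaveis (numeros : List Int) (out : List (String × Int)) : Prop := out = calcular_variaveis_alt numeros
instance (numeros : List Int) (out : List (String × Int)) : Decidable (Spec_calcular_variaveis numeros out) := by unfold Spec_calcular_variaveis; infer_instance

-- ===== CLAIM (what is proved, stated in full; the proofs are below) =====
def Claim_equal_calcular_variaveis : Prop := ∀ (numeros : List Int), Dom_calcular_variaveis numeros → Spec_calcular_variaveis numeros (calcular_variaveis numeros)

-- ===== LEMMAS AND PROOFS =====

theorem pvLoop_spec (t : List Int) (a b c d e f g : Int) :
    pvLoop t (a, b, c, d, e, f, g) =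
      (t.foldl (· + ·) a,
       t.foldl (fun m n => if m < n then n else m) b,
       t.foldl (fun m n => if n < m then n else m) c,
       t.foldl (fun acc n => if PySem.Int.mod n 2 = 0 then acc + n else acc) d,
       t.foldl (fun acc n => if PySem.Int.mod n 2 = 0 then acc else acc + n) e,
       t.foldl (fun acc n => acc + PySem.Int.mod n 10) f,
       g + t.length) := by
  induction t generalizing a b c d e f g with
  | nil => simp [pvLoop]
  | cons n rest ih => simp [pvLoop, ih]; omega

theorem max_fold_eq (t : List Int) (b : Int) :
    t.foldl (fun m n => if m < n then n else m) b = t.foldl max b := by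
  have : (fun (m n : Int) => if m < n then n else m) = max := by
    funext m n; simp only [max_def]; split_ifs <;> omega
  rw [this]

theorem min_fold_eq (t : List Int) (c : Int) :
    t.foldl (fun m n => if n < m then n else m) c = t.foldl min c := by
  have : (fun (m n : Int) => if n < m then n else m) = min := by
    funext m n; simp only [min_def]; split_ifs <;> omega
  rw [this]

theorem imp_fold_eq (t : List Int) (e : Int) :
    t.foldl (fun acc n => if PySem.Int.mod n 2 = 0 then acc else acc + n) e =
    t.foldl (fun acc n => if PySem.Int.mod n 2 ≠ 0 then acc + n else acc) e := by
  have : (fun (acc n : Int) => if PySem.Int.mod n 2 = 0 then acc else acc + n) =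
      (fun (acc n : Int) => if PySem.Int.mod n 2 ≠ 0 then acc + n else acc) := by
    funext acc n; by_cases h : PySem.Int.mod n 2 = 0
    · rw [if_pos h, if_neg (not_not_intro h)]
    · rw [if_neg h, if_pos h]
  rw [this]

-- last element of a (·≤·)-pairwise list is an upper bound
theorem pairwise_getLast?_ub : ∀ (l : List Int), l.Pairwise (· ≤ ·) →
    ∀ z, l.getLast? = some z → ∀ y ∈ l, y ≤ z := by
  intro l
  induction l with
  | nil => intro _ z hz; simp at hz
  | cons a l ih =>
    intro hp z hz y hy
    rcases List.pairwise_cons.mp hp with ⟨ha, hp'⟩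
    cases l with
    | nil => simp at hz hy; omega
    | cons b l' =>
      rw [List.getLast?_cons_cons] at hz
      rcases List.mem_cons.mp hy with rfl | hy'
      · exact le_trans (ha z (List.mem_of_getLast? hz)) le_rfl
      · exact ih hp' z hz y hy'

theorem calcular_variaveis_eq (numeros : List Int) :
    calcular_variaveis numeros = calcular_variaveis_alt numeros := by
  cases numeros with
  | nil => rfl
  | cons h t =>
    simp only [calcular_variaveis, calcular_variaveis_alt, pvLoop_spec,
      max_fold_eq, min_fold_eq, imp_fold_eq]
    -- extrema as folds
    have hmax : (PySem.List.max? (h :: t) (fun y => y)).getD 0 = t.foldl max h := by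
      rw [PySem.List.max?_id_cons]; rfl
    have hmin : (PySem.List.min? (h :: t) (fun y => y)).getD 0 = t.foldl min h := by
      rw [PySem.List.min?_id_cons]; rfl
    -- sorted head = running min
    have hminmem : t.foldl min h ∈ h :: t := by
      have := PySem.List.min?_mem (xs := h :: t) (key := fun y => y)
        (m := t.foldl min h) (by rw [PySem.List.min?_id_cons])
      exact this
    have hminlb : ∀ y ∈ h :: t, t.foldl min h ≤ y := by
      intro y hy
      exact PySem.List.min?_isMin (by rw [PySem.List.min?_id_cons]) y hy
    have hmaxmem : t.foldl max h ∈ h :: t := by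
      exact PySem.List.max?_mem (xs := h :: t) (key := fun y => y)
        (m := t.foldl max h) (by rw [PySem.List.max?_id_cons])
    have hmaxub : ∀ y ∈ h :: t, y ≤ t.foldl max h := by
      intro y hy
      exact PySem.List.max?_isMax (by rw [PySem.List.max?_id_cons]) y hy
    have hsne : PySem.List.sorted (h :: t) (fun y => y) false ≠ [] := by
      simp [PySem.List.sorted_eq_nil_iff]
    obtain ⟨m, srtl, hsrt⟩ : ∃ m srtl, PySem.List.sorted (h :: t) (fun y => y) false = m :: srtl := by
      cases hs : PySem.List.sorted (h :: t) (fun y => y) false with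
      | nil => exact absurd hs hsne
      | cons m srtl => exact ⟨m, srtl, rfl⟩
    have hhead : ((PySem.List.sorted (h :: t) (fun y => y) false)[0]?).getD 0 = t.foldl min h := by
      rw [hsrt]
      have hmmem : m ∈ h :: t := by
        rw [← PySem.List.mem_sorted (key := fun y => y) (rev := false), hsrt]; simp
      have h1 : m ≤ t.foldl min h :=
        PySem.List.key_head_sorted_le (h :: t) (fun y => y) hsrt _ hminmem
      have h2 : t.foldl min h ≤ m := hminlb m hmmem
      simp; omega
    have hlast : ((PySem.List.sorted (h :: t) (fun y => y) false).getLast?).getD 0 = t.foldl max h := by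
      obtain ⟨z, hz⟩ : ∃ z, (PySem.List.sorted (h :: t) (fun y => y) false).getLast? = some z := by
        cases hzz : (PySem.List.sorted (h :: t) (fun y => y) false).getLast? with
        | none => exact absurd (List.getLast?_eq_none_iff.mp hzz) hsne
        | some z => exact ⟨z, rfl⟩
      have hzmem : z ∈ h :: t := by
        rw [← PySem.List.mem_sorted (key := fun y => y) (rev := false)]
        exact List.mem_of_getLast? hz
      have hub : ∀ y ∈ h :: t, y ≤ z := by
        intro y hy
        have hpw := PySem.List.sorted_pairwise (xs := h :: t) (key := fun y => y)
        have hy' : y ∈ PySem.List.sorted (h :: t) (fun y => y) false := by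
          rw [PySem.List.mem_sorted]; exact hy
        exact pairwise_getLast?_ub _ hpw z hz y hy'
      have h1 : z ≤ t.foldl max h := hmaxub z hzmem
      have h2 : t.foldl max h ≤ z := hub _ hmaxmem
      rw [hz]; simp; omega
    have hlen : ((h :: t).length : Int) = 1 + (t.length : Int) := by
      simp [List.length_cons]; ring
    have hinit : (if PySem.Int.mod h 2 = 0 then (0 : Int) else h) =
        (if PySem.Int.mod h 2 ≠ 0 then h else 0) := by
      by_cases hh : PySem.Int.mod h 2 = 0
      · rw [if_pos hh, if_neg (not_not_intro hh)]
      · rw [if_neg hh, if_pos hh]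
    simp only [hmax, hmin, hhead, hlast, hlen, List.foldl_cons, zero_add, hinit]

-- ===== VERDICT (by name: the statement is the Claim_ definition above) =====
theorem calcular_variaveis_spec : Claim_equal_calcular_variaveis := by
  intro numeros _
  unfold Spec_calcular_variaveis
  exact calcular_variaveis_eq numeros
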